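-- pv_equiv track=rewrite | github.com/lucianoshelby/automx | automacoes/cos/coletar_dados_cos.py | definir_defeito_mista_ow
-- ===== SOURCE A (Python) =====
-- def definir_defeito_mista_ow(descricao):
--     descricao_lower = descricao.lower()
--
--     if "repair kit" in descricao_lower or "tape" in descricao_lower:
--         return None  # Ignorar essa peça
--     if "vinyl" in descricao_lower or "protector" in descricao_lower:
--         return "Troca obrigatória"
--     if "pba main" in descricao_lower or "pba-main" in descricao_lower:
--         return "OXIDAÇÃO"
--     if any(term in descricao_lower for term in ["octa assy", "front-bt", "front-lte", "sub ub", "mea front-sm-r", "lcd", "sub oled", "smt-octa", "assy-oled", "main display", "main ub", "assy oled"]):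
--         return "TRINCADO"
--     if "batt" in descricao_lower or "battery" in descricao_lower:
--         return "TROCA OBRIGATÓRIA"
--     if ("if pba" in descricao_lower or "sub pba" in descricao_lower) and not any(term in descricao_lower for term in ["fpcb", "camera", "volume", "frc", "ctc"]):
--         return "OXIDAÇÃO"
--     if any(term in descricao_lower for term in ["fpcb", "frc", "ctc", "con to con", "con-to-con"]):
--         return "OXIDAÇÃO"
--     if "camera" in descricao_lower:
--         return "DANO POR IMPACTO"
--     if any(term in descricao_lower for term in ["case-front", "case-rear", "metal front", "front module", "aro"]):
--         return "DANO POR IMPACTO"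
--     if any(term in descricao_lower for term in ["cover-back", "back cover", "back glass", "svc cover", "deco cam", "window display-2d_cam"]):
--         return "TRINCADO"
--     return "Defeito desconhecido"  # Agora retorna None se não se encaixar em nenhuma regra
-- ===== SOURCE B (Python) =====
-- # Flat term index: every search term appears once with the priority of its rule
-- # and the rule's verdict.  Classification = collect ALL matching terms, demote
-- # the exclusion-guarded rule when an exclusion term is present, take the
-- # highest-priority (lowest number) hit.
-- TERMS = [
--     ("repair kit", 0, None), ("tape", 0, None),
--     ("vinyl", 1, "Troca obrigatória"), ("protector", 1, "Troca obrigatória"),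
--     ("pba main", 2, "OXIDAÇÃO"), ("pba-main", 2, "OXIDAÇÃO"),
--     ("octa assy", 3, "TRINCADO"), ("front-bt", 3, "TRINCADO"),
--     ("front-lte", 3, "TRINCADO"), ("sub ub", 3, "TRINCADO"),
--     ("mea front-sm-r", 3, "TRINCADO"), ("lcd", 3, "TRINCADO"),
--     ("sub oled", 3, "TRINCADO"), ("smt-octa", 3, "TRINCADO"),
--     ("assy-oled", 3, "TRINCADO"), ("main display", 3, "TRINCADO"),
--     ("main ub", 3, "TRINCADO"), ("assy oled", 3, "TRINCADO"),
--     ("batt", 4, "TROCA OBRIGATÓRIA"), ("battery", 4, "TROCA OBRIGATÓRIA"),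
--     ("if pba", 5, "OXIDAÇÃO"), ("sub pba", 5, "OXIDAÇÃO"),
--     ("fpcb", 6, "OXIDAÇÃO"), ("frc", 6, "OXIDAÇÃO"), ("ctc", 6, "OXIDAÇÃO"),
--     ("con to con", 6, "OXIDAÇÃO"), ("con-to-con", 6, "OXIDAÇÃO"),
--     ("camera", 7, "DANO POR IMPACTO"),
--     ("case-front", 8, "DANO POR IMPACTO"), ("case-rear", 8, "DANO POR IMPACTO"),
--     ("metal front", 8, "DANO POR IMPACTO"), ("front module", 8, "DANO POR IMPACTO"),
--     ("aro", 8, "DANO POR IMPACTO"),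
--     ("cover-back", 9, "TRINCADO"), ("back cover", 9, "TRINCADO"),
--     ("back glass", 9, "TRINCADO"), ("svc cover", 9, "TRINCADO"),
--     ("deco cam", 9, "TRINCADO"), ("window display-2d_cam", 9, "TRINCADO"),
-- ]
-- EXCLUDE = ["fpcb", "camera", "volume", "frc", "ctc"]
--
-- def definir_defeito_mista_ow(descricao):
--     d = descricao.lower()
--     hits = [(p, r) for t, p, r in TERMS if t in d]
--     if any(t in d for t in EXCLUDE):
--         hits = [h for h in hits if h[0] != 5]
--     if not hits:
--         return "Defeito desconhecido"
--     return min(hits, key=lambda h: h[0])[1]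
-- ===== Notes on version B (the rewrite author's own statement) =====
-- stated objective: alternative
-- what changed: Replaces the ordered if/elif cascade with a flat term index (term, priority, verdict): B collects ALL matching terms, demotes the exclusion-guarded priority class when an exclusion term is present, and returns the verdict of the minimum-priority hit.
import Mathlib
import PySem

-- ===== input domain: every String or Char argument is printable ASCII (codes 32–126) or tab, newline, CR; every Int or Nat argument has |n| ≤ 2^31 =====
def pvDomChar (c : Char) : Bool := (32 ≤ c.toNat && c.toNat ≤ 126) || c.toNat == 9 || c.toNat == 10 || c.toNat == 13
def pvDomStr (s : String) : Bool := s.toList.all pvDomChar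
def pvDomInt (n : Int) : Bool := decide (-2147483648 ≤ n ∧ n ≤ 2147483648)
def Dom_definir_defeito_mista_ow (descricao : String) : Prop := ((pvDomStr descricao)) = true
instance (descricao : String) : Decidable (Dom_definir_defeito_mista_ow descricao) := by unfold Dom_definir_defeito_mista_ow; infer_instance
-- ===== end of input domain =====

-- B replaces A's ordered if/elif cascade by a flat term index (term, priority, verdict):
-- it collects ALL matching terms, demotes the exclusion-guarded priority when an
-- exclusion term occurs, and returns the minimum-priority hit (objective: alternative).

-- ===== PORT A =====
def definir_defeito_mista_ow (descricao : String) : Option String :=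
  let d := PySem.Str.lower descricao
  if PySem.Str.isIn "repair kit" d || PySem.Str.isIn "tape" d then none
  else if PySem.Str.isIn "vinyl" d || PySem.Str.isIn "protector" d then some "Troca obrigatória"
  else if PySem.Str.isIn "pba main" d || PySem.Str.isIn "pba-main" d then some "OXIDAÇÃO"
  else if (["octa assy", "front-bt", "front-lte", "sub ub", "mea front-sm-r", "lcd", "sub oled", "smt-octa", "assy-oled", "main display", "main ub", "assy oled"].any (fun t => PySem.Str.isIn t d)) then some "TRINCADO"
  else if PySem.Str.isIn "batt" d || PySem.Str.isIn "battery" d then some "TROCA OBRIGATÓRIA"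
  else if (PySem.Str.isIn "if pba" d || PySem.Str.isIn "sub pba" d) && !(["fpcb", "camera", "volume", "frc", "ctc"].any (fun t => PySem.Str.isIn t d)) then some "OXIDAÇÃO"
  else if (["fpcb", "frc", "ctc", "con to con", "con-to-con"].any (fun t => PySem.Str.isIn t d)) then some "OXIDAÇÃO"
  else if PySem.Str.isIn "camera" d then some "DANO POR IMPACTO"
  else if (["case-front", "case-rear", "metal front", "front module", "aro"].any (fun t => PySem.Str.isIn t d)) then some "DANO POR IMPACTO"
  else if (["cover-back", "back cover", "back glass", "svc cover", "deco cam", "window display-2d_cam"].any (fun t => PySem.Str.isIn t d)) then some "TRINCADO"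
  else some "Defeito desconhecido"

-- ===== PORT B =====
-- flat term index: (search term, rule priority, verdict)
def pvTerms : List (String × Nat × Option String) :=
  [ ("repair kit", 0, none), ("tape", 0, none),
    ("vinyl", 1, some "Troca obrigatória"), ("protector", 1, some "Troca obrigatória"),
    ("pba main", 2, some "OXIDAÇÃO"), ("pba-main", 2, some "OXIDAÇÃO"),
    ("octa assy", 3, some "TRINCADO"), ("front-bt", 3, some "TRINCADO"),
    ("front-lte", 3, some "TRINCADO"), ("sub ub", 3, some "TRINCADO"),
    ("mea front-sm-r", 3, some "TRINCADO"), ("lcd", 3, some "TRINCADO"),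
    ("sub oled", 3, some "TRINCADO"), ("smt-octa", 3, some "TRINCADO"),
    ("assy-oled", 3, some "TRINCADO"), ("main display", 3, some "TRINCADO"),
    ("main ub", 3, some "TRINCADO"), ("assy oled", 3, some "TRINCADO"),
    ("batt", 4, some "TROCA OBRIGATÓRIA"), ("battery", 4, some "TROCA OBRIGATÓRIA"),
    ("if pba", 5, some "OXIDAÇÃO"), ("sub pba", 5, some "OXIDAÇÃO"),
    ("fpcb", 6, some "OXIDAÇÃO"), ("frc", 6, some "OXIDAÇÃO"), ("ctc", 6, some "OXIDAÇÃO"),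
    ("con to con", 6, some "OXIDAÇÃO"), ("con-to-con", 6, some "OXIDAÇÃO"),
    ("camera", 7, some "DANO POR IMPACTO"),
    ("case-front", 8, some "DANO POR IMPACTO"), ("case-rear", 8, some "DANO POR IMPACTO"),
    ("metal front", 8, some "DANO POR IMPACTO"), ("front module", 8, some "DANO POR IMPACTO"),
    ("aro", 8, some "DANO POR IMPACTO"),
    ("cover-back", 9, some "TRINCADO"), ("back cover", 9, some "TRINCADO"),
    ("back glass", 9, some "TRINCADO"), ("svc cover", 9, some "TRINCADO"),
    ("deco cam", 9, some "TRINCADO"), ("window display-2d_cam", 9, some "TRINCADO") ]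

def pvExclude : List String := ["fpcb", "camera", "volume", "frc", "ctc"]

def definir_defeito_mista_ow_alt (descricao : String) : Option String :=
  let d := PySem.Str.lower descricao
  let hits := pvTerms.filterMap (fun x => if PySem.Str.isIn x.1 d then some x.2 else none)
  let hits := if pvExclude.any (fun t => PySem.Str.isIn t d) then hits.filter (fun h => h.1 != 5) else hits
  match hits with
  | [] => some "Defeito desconhecido"
  | h :: rest => (rest.foldl (fun best x => if x.1 < best.1 then x else best) h).2

-- ===== PRECONDITION & SPEC =====
def Spec_definir_defeito_mista_ow (descricao : String) (out : Option String) : Prop := out = definir_defeito_mista_ow_alt descricao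
instance (descricao : String) (out : Option String) : Decidable (Spec_definir_defeito_mista_ow descricao out) := by unfold Spec_definir_defeito_mista_ow; infer_instance

-- ===== CLAIM (what is proved, stated in full; the proofs are below) =====
def Claim_equal_definir_defeito_mista_ow : Prop := ∀ (descricao : String), Dom_definir_defeito_mista_ow descricao → Spec_definir_defeito_mista_ow descricao (definir_defeito_mista_ow descricao)

-- ===== LEMMAS AND PROOFS =====

-- first matching entry of the flat index (reference cascade used only in the proof)
def pvFirst (q : String × Nat × Option String → Bool) : List (String × Nat × Option String) → Option String
  | [] => some "Defeito desconhecido"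
  | x :: rest => if q x then x.2.2 else pvFirst q rest

lemma pvFoldMin_sorted (h : Nat × Option String) (rest : List (Nat × Option String))
    (hle : ∀ x ∈ rest, h.1 ≤ x.1) :
    rest.foldl (fun best x => if x.1 < best.1 then x else best) h = h := by
  induction rest with
  | nil => rfl
  | cons x xs ih =>
      have hx : h.1 ≤ x.1 := hle x (by simp)
      simp only [List.foldl_cons, if_neg (by omega : ¬ x.1 < h.1)]
      exact ih (fun y hy => hle y (by simp [hy]))

lemma pvFilterMap_eq (q : String × Nat × Option String → Bool)
    (l : List (String × Nat × Option String)) :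
    l.filterMap (fun x => if q x then some x.2 else none) = (l.filter q).map (·.2) := by
  induction l with
  | nil => rfl
  | cons x xs ih => by_cases h : q x <;> simp [h, ih]

lemma pvSel_eq_first (q : String × Nat × Option String → Bool)
    (l : List (String × Nat × Option String))
    (hs : l.Pairwise (fun a b => a.2.1 ≤ b.2.1)) :
    (match l.filterMap (fun x => if q x then some x.2 else none) with
     | [] => some "Defeito desconhecido"
     | h :: rest => (rest.foldl (fun best x => if x.1 < best.1 then x else best) h).2)
    = pvFirst q l := by
  induction l with
  | nil => rfl
  | cons x xs ih =>
      have hs' := (List.pairwise_cons.mp hs).2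
      have hxle := (List.pairwise_cons.mp hs).1
      by_cases h : q x
      · simp only [List.filterMap_cons, h, if_pos, pvFirst]
        have : ∀ y ∈ (xs.filter q).map (fun z => z.2), x.2.1 ≤ y.1 := by
          intro y hy
          simp only [List.mem_map, List.mem_filter] at hy
          obtain ⟨z, ⟨hz, _⟩, rfl⟩ := hy
          exact hxle z hz
        rw [pvFilterMap_eq]
        rw [pvFoldMin_sorted x.2 _ this]
      · simp only [List.filterMap_cons, h, pvFirst]
        simpa [h] using ih hs'
  
lemma pvFilter_filterMap (q : String × Nat × Option String → Bool)
    (l : List (String × Nat × Option String)) :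
    (l.filterMap (fun x => if q x then some x.2 else none)).filter (fun h => h.1 != 5)
      = l.filterMap (fun x => if q x && (x.2.1 != 5) then some x.2 else none) := by
  induction l with
  | nil => rfl
  | cons x xs ih =>
      by_cases h : q x
      · by_cases h5 : x.2.1 = 5 <;> simp [h, h5, ih]
      · simp [h, ih]

lemma pvTerms_sorted : pvTerms.Pairwise (fun a b => a.2.1 ≤ b.2.1) := by decide

lemma pvIfOr {α : Type} (a b : Bool) (x y : α) :
    (if (a || b) then x else y) = (if a then x else if b then x else y) := by
  cases a <;> simp

-- ===== VERDICT (by name: the statement is the Claim_ definition above) =====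
theorem definir_defeito_mista_ow_spec : Claim_equal_definir_defeito_mista_ow := by
  intro descricao _
  unfold Spec_definir_defeito_mista_ow definir_defeito_mista_ow definir_defeito_mista_ow_alt
  set d := PySem.Str.lower descricao with hd
  by_cases he : pvExclude.any (fun t => PySem.Str.isIn t d) = true
  · simp only [he, if_pos]
    rw [pvFilter_filterMap, pvSel_eq_first _ _ pvTerms_sorted]
    unfold pvExclude at he
    simp only [List.any_cons, List.any_nil, Bool.or_false] at he
    simp only [List.any_cons, List.any_nil, Bool.or_false, he, Bool.not_true,
      Bool.and_false, Bool.and_true, Bool.false_eq_true, if_false,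
      Nat.reduceBNe, bne_self_eq_false, pvIfOr, pvFirst, pvTerms]
  · have he' : pvExclude.any (fun t => PySem.Str.isIn t d) = false := by
      revert he; cases pvExclude.any (fun t => PySem.Str.isIn t d) <;> simp
    simp only [he', Bool.false_eq_true, if_false]
    rw [pvSel_eq_first _ _ pvTerms_sorted]
    unfold pvExclude at he'
    simp only [List.any_cons, List.any_nil, Bool.or_false, Bool.or_eq_false_iff] at he'
    obtain ⟨h1, h2, h3, h4, h5⟩ := he'
    simp only [List.any_cons, List.any_nil, Bool.or_false, h1, h2, h3, h4, h5,
      Bool.not_false, Bool.and_true, Bool.false_eq_true, if_false,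
      pvIfOr, pvFirst, pvTerms]
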